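-- pv_equiv track=rewrite | github.com/chosaihim/jungle_git | codingTest/징검다리건너기.py | crossBridge
-- ===== SOURCE A (Python) =====
-- def crossBridge(num, stones, k):
--     blank = 0
--     for s in stones:
--         # 연속적으로 사람수보다 작은 수의 돌이 나오면 징검다리 못 건넘
--         if s < num:
--             blank += 1
--             if blank == k:
--                 return False
--         else:
--             blank = 0
--     return True
-- ===== SOURCE B (Python) =====
-- def crossBridge(num, stones, k):
--     if k < 1:
--         return True
--     highs = [i for i, s in enumerate(stones) if s >= num]
--     bounds = [-1] + highs + [len(stones)]
--     return all(b - a - 1 < k for a, b in zip(bounds, bounds[1:]))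
-- ===== Notes on version B (the rewrite author's own statement) =====
-- stated objective: alternative
-- what changed: B collects the indices of stones >= num, brackets them with -1 and len(stones), and returns True iff every gap between consecutive such indices is < k, instead of A's single pass with a running counter of consecutive low stones and an early return.
import Mathlib
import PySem

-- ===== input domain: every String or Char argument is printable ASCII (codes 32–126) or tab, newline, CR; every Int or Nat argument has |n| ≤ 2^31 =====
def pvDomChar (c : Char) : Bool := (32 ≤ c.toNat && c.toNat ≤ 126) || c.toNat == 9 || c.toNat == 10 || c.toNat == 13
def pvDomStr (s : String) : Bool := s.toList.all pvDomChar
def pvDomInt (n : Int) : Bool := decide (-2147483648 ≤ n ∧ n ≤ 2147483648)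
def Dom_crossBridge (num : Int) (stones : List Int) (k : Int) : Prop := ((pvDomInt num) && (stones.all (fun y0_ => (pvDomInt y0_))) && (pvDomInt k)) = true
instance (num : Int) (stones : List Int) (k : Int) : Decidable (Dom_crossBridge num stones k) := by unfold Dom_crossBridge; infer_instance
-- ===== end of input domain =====

-- B replaces A's running counter of consecutive low stones by staged passes: collect the
-- indices of adequate stones, bracket them with -1 and len(stones), and test every gap
-- between consecutive indices against k; objective: a genuinely different algorithm.

-- ===== PORT A =====
-- A's for-loop with the mutable counter `blank` and its early `return False`.
def crossBridgeLoop (num : Int) (k : Int) : List Int → Int → Bool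
  | [], _ => true
  | s :: rest, blank =>
    if s < num then
      if blank + 1 == k then false
      else crossBridgeLoop num k rest (blank + 1)
    else crossBridgeLoop num k rest 0

def crossBridge (num : Int) (stones : List Int) (k : Int) : Bool :=
  crossBridgeLoop num k stones 0

-- ===== PORT B =====
-- Source B: if k < 1: True; highs = [i for i, s in enumerate(stones) if s >= num];
--       bounds = [-1] + highs + [len(stones)]; all(b - a - 1 < k for a, b in zip(bounds, bounds[1:]))
def crossBridge_alt (num : Int) (stones : List Int) (k : Int) : Bool :=
  if k < 1 then true
  else
    let highs := ((PySem.List.enumerate stones 0).filter fun p => decide (num ≤ p.2)).map (·.1)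
    let bounds := -1 :: (highs ++ [(stones.length : Int)])
    (bounds.zip (PySem.List.slice bounds (some 1) none)).all fun p => decide (p.2 - p.1 - 1 < k)

-- ===== PRECONDITION & SPEC =====
def Spec_crossBridge (num : Int) (stones : List Int) (k : Int) (out : Bool) : Prop := out = crossBridge_alt num stones k
instance (num : Int) (stones : List Int) (k : Int) (out : Bool) : Decidable (Spec_crossBridge num stones k out) := by unfold Spec_crossBridge; infer_instance

-- ===== CLAIM (what is proved, stated in full; the proofs are below) =====
def Claim_equal_crossBridge : Prop := ∀ (num : Int) (stones : List Int) (k : Int), Dom_crossBridge num stones k → Spec_crossBridge num stones k (crossBridge num stones k)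

-- ===== LEMMAS AND PROOFS =====

-- the indices (starting at t) of the stones ≥ num (proof-side name for B's list comprehension)
def highsFrom (num : Int) (t : Int) (xs : List Int) : List Int :=
  ((PySem.List.enumerate xs t).filter fun p => decide (num ≤ p.2)).map (·.1)

-- the adjacent-gap check on prev :: hs ++ [last] (proof-side recursion for B's zip/all pass)
def adjOK (k : Int) : Int → List Int → Int → Bool
  | prev, [], last => decide (last - prev - 1 < k)
  | prev, h :: hs, last => decide (h - prev - 1 < k) && adjOK k h hs last

theorem highsFrom_nil (num t : Int) : highsFrom num t [] = [] := by
  simp [highsFrom, PySem.List.enumerate_nil]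

theorem highsFrom_cons (num t s : Int) (xs : List Int) :
    highsFrom num t (s :: xs)
      = if num ≤ s then t :: highsFrom num (t + 1) xs else highsFrom num (t + 1) xs := by
  by_cases h : num ≤ s <;> simp [highsFrom, PySem.List.enumerate_cons, h]

theorem mem_highsFrom_ge (num : Int) (xs : List Int) :
    ∀ t h : Int, h ∈ highsFrom num t xs → t ≤ h := by
  induction xs with
  | nil => intro t h hh; simp [highsFrom_nil] at hh
  | cons s rest ih =>
    intro t h hh
    rw [highsFrom_cons] at hh
    split at hh
    · rcases List.mem_cons.mp hh with rfl | hh'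
      · omega
      · have := ih (t + 1) h hh'; omega
    · have := ih (t + 1) h hh; omega

-- B's zip/all pass over prev :: hs ++ [last] equals the adjOK recursion
theorem zip_all_eq_adjOK (k : Int) (hs : List Int) :
    ∀ prev last : Int,
      ((prev :: (hs ++ [last])).zip ((hs ++ [last]))).all (fun p => decide (p.2 - p.1 - 1 < k))
        = adjOK k prev hs last := by
  induction hs with
  | nil => intro prev last; simp [adjOK]
  | cons h hs' ih => intro prev last; simp [adjOK, ← ih h last]

-- if k ≤ 0 the loop can never hit blank + 1 == k (blank stays ≥ 0)
theorem loop_k_nonpos (num : Int) (k : Int) (hk : k ≤ 0) (stones : List Int) :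
    ∀ blank : Int, 0 ≤ blank → crossBridgeLoop num k stones blank = true := by
  induction stones with
  | nil => intro blank _; rfl
  | cons s rest ih =>
    intro blank hb
    simp only [crossBridgeLoop]
    split
    · have : ¬ (blank + 1 == k) := by simp; omega
      simp [this]
      exact ih (blank + 1) (by omega)
    · exact ih 0 (by omega)

-- main invariant: at position t with last adequate index prev (so counter = t - prev - 1),
-- A's loop agrees with B's gap check on the remaining stones
theorem loop_vs_gaps (num : Int) (k : Int) (hk : 1 ≤ k) (xs : List Int) :
    ∀ t prev blank : Int, blank = t - prev - 1 → 0 ≤ blank → blank < k →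
      crossBridgeLoop num k xs blank
        = adjOK k prev (highsFrom num t xs) (t + xs.length) := by
  induction xs with
  | nil =>
    intro t prev blank hbe h0 hb
    simp only [crossBridgeLoop, highsFrom_nil, adjOK, List.length_nil]
    symm
    rw [decide_eq_true_eq]
    omega
  | cons s rest ih =>
    intro t prev blank hbe h0 hb
    simp only [crossBridgeLoop]
    by_cases hs : s < num
    · simp only [hs, if_true]
      have hhigh : highsFrom num t (s :: rest) = highsFrom num (t + 1) rest := by
        rw [highsFrom_cons]; simp; omega
      rw [hhigh]
      by_cases he : blank + 1 = k
      · simp only [he, beq_self_eq_true, if_true]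
        -- the next gap spans at least the k low stones just counted
        rcases hH : highsFrom num (t + 1) rest with _ | ⟨h, hs'⟩
        · have hlen : ¬ (t + (s :: rest).length - prev - 1 < k) := by
            simp only [List.length_cons]
            push_cast
            omega
          simp only [adjOK]
          symm
          rw [decide_eq_false_iff_not]
          omega
        · have hmem : h ∈ highsFrom num (t + 1) rest := by rw [hH]; simp
          have := mem_highsFrom_ge num rest (t + 1) h hmem
          have : ¬ (h - prev - 1 < k) := by omega
          simp [adjOK, this]
      · have : (blank + 1 == k) = false := by simp; omega
        simp only [this, Bool.false_eq_true, if_false]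
        rw [ih (t + 1) prev (blank + 1) (by omega) (by omega) (by omega)]
        congr 1
        simp only [List.length_cons]
        push_cast
        ring
    · simp only [hs, if_false]
      have hhigh : highsFrom num t (s :: rest) = t :: highsFrom num (t + 1) rest := by
        rw [highsFrom_cons]; simp; omega
      rw [hhigh]
      simp only [adjOK]
      have hgap : t - prev - 1 < k := by omega
      rw [ih (t + 1) t 0 (by omega) (by omega) (by omega)]
      simp only [hgap, decide_true, Bool.true_and, List.length_cons]
      congr 1
      push_cast
      ring

-- ===== VERDICT (by name: the statement is the Claim_ definition above) =====
theorem crossBridge_spec : Claim_equal_crossBridge := by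
  intro num stones k _
  show crossBridge num stones k = crossBridge_alt num stones k
  by_cases hk : k < 1
  · have := loop_k_nonpos num k (by omega) stones 0 (by omega)
    simp [crossBridge, this, crossBridge_alt, hk]
  · simp only [crossBridge_alt, hk, if_false]
    have hslice : PySem.List.slice
        ((-1 : Int) :: (highsFrom num 0 stones ++ [(stones.length : Int)])) (some 1) none
        = highsFrom num 0 stones ++ [(stones.length : Int)] := by
      rw [PySem.List.slice_from _ (by omega)]
      rfl
    show crossBridge num stones k
      = ((((-1 : Int) :: (highsFrom num 0 stones ++ [(stones.length : Int)])).zip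
          (PySem.List.slice ((-1 : Int) :: (highsFrom num 0 stones ++ [(stones.length : Int)])) (some 1) none)).all
          fun p => decide (p.2 - p.1 - 1 < k))
    rw [hslice, zip_all_eq_adjOK k (highsFrom num 0 stones) (-1) (stones.length : Int)]
    rw [crossBridge, loop_vs_gaps num k (by omega) stones 0 (-1) 0 (by omega) (by omega) (by omega)]
    norm_num
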